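-- pv_equiv track=rewrite | github.com/f-o-o-g-s/eightbox | backup.py | format_conventional_commit
-- ===== SOURCE A (Python) =====
-- COMMIT_TYPES = [
--     "feat",
--     "fix",
--     "docs",
--     "style",
--     "refactor",
--     "perf",
--     "test",
--     "build",
--     "ci",
--     "chore",
--     "revert",
-- ]
--
-- def format_conventional_commit(description):
--     """Format message to follow conventional commit standards.
--
--     Args:
--         description (str): The commit message
--
--     Returns:
--         str: Properly formatted conventional commit message
--     """
--     # If message already follows convention, return as is
--     if any(
--         description.startswith(f"{t}:")
--         or description.startswith(f"{t}!:")
--         or description.startswith(f"{t}(")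
--         for t in COMMIT_TYPES
--     ):
--         return description
--
--     # Default to fix: prefix
--     return f"fix: {description}"
-- ===== SOURCE B (Python) =====
-- COMMIT_TYPES = [
--     "feat",
--     "fix",
--     "docs",
--     "style",
--     "refactor",
--     "perf",
--     "test",
--     "build",
--     "ci",
--     "chore",
--     "revert",
-- ]
--
-- _TYPE_SET = frozenset(COMMIT_TYPES)
--
--
-- def format_conventional_commit(description):
--     """Format message to follow conventional commit standards.
--
--     Instead of trying every commit type with three startswith calls,
--     split the message once at the end of its leading lowercase-letter
--     run, then do a single set-membership test of that word and a direct
--     check of the separator that follows.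
--     """
--     i = 0
--     n = len(description)
--     while i < n and "a" <= description[i] <= "z":
--         i += 1
--     if description[:i] in _TYPE_SET:
--         sep = description[i:i + 2]
--         if sep[:1] == ":" or sep[:1] == "(" or sep == "!:":
--             return description
--     return "fix: " + description
-- ===== Notes on version B (the rewrite author's own statement) =====
-- stated objective: idiomatic
-- what changed: Instead of looping over all commit types with three startswith calls each, B splits the message once at the end of its leading lowercase run, tests that word with one set-membership lookup and checks the following separator directly.
import Mathlib
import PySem

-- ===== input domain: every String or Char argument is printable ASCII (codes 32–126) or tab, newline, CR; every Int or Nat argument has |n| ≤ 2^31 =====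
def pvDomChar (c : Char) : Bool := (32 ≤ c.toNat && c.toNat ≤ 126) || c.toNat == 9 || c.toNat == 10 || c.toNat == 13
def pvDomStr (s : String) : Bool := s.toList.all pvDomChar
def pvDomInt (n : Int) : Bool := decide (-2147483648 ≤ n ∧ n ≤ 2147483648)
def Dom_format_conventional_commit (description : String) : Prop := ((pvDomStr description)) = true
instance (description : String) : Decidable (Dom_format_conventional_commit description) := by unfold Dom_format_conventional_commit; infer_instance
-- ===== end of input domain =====

-- A = per-type startswith loop over COMMIT_TYPES; B = split once at the end of the leading
-- lowercase run, then one set-membership test of the word and a direct separator check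
-- (idiomatic restructuring, same results).


-- ===== PORT A =====
-- module constant COMMIT_TYPES as A iterates over it (char lists, prefix-tested)
def commitTypes : List (List Char) :=
  [['f', 'e', 'a', 't'],
   ['f', 'i', 'x'],
   ['d', 'o', 'c', 's'],
   ['s', 't', 'y', 'l', 'e'],
   ['r', 'e', 'f', 'a', 'c', 't', 'o', 'r'],
   ['p', 'e', 'r', 'f'],
   ['t', 'e', 's', 't'],
   ['b', 'u', 'i', 'l', 'd'],
   ['c', 'i'],
   ['c', 'h', 'o', 'r', 'e'],
   ['r', 'e', 'v', 'e', 'r', 't']]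

def format_conventional_commit (description : String) : String :=
  if commitTypes.any (fun t =>
      PySem.Chars.startswith description.toList (t ++ [':'])
      || PySem.Chars.startswith description.toList (t ++ ['!', ':'])
      || PySem.Chars.startswith description.toList (t ++ ['('])) then
    description
  else
    String.ofList ("fix: ".toList ++ description.toList)

-- ===== PORT B =====
-- _TYPE_SET: the commit types as whole words
def commitTypeWords : PySem.Set String :=
  PySem.Set.ofList
    ["feat", "fix", "docs", "style", "refactor", "perf", "test", "build", "ci", "chore", "revert"]

def isLowerAscii (c : Char) : Bool := 'a' ≤ c && c ≤ 'z'

-- the while loop: walk off the leading run of lowercase letters, returning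
-- (description[:i], description[i:])
def splitWord : List Char → List Char × List Char
  | [] => ([], [])
  | c :: cs =>
    if isLowerAscii c then
      let (w, r) := splitWord cs
      (c :: w, r)
    else ([], c :: cs)

-- sep = description[i:i+2]; sep[:1] == ":" or sep[:1] == "(" or sep == "!:"
def sepOk (rest : List Char) : Bool :=
  let sep := rest.take 2
  sep.take 1 == [':'] || sep.take 1 == ['('] || sep == ['!', ':']

def format_conventional_commit_alt (description : String) : String :=
  let (w, r) := splitWord description.toList
  if PySem.Set.contains commitTypeWords (String.ofList w) && sepOk r then
    description
  else
    "fix: " ++ description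

-- ===== PRECONDITION & SPEC =====
def Spec_format_conventional_commit (description : String) (out : String) : Prop := out = format_conventional_commit_alt description
instance (description : String) (out : String) : Decidable (Spec_format_conventional_commit description out) := by unfold Spec_format_conventional_commit; infer_instance

-- ===== CLAIM (what is proved, stated in full; the proofs are below) =====
def Claim_equal_format_conventional_commit : Prop := ∀ (description : String), Dom_format_conventional_commit description → Spec_format_conventional_commit description (format_conventional_commit description)

-- ===== LEMMAS AND PROOFS =====

lemma splitWord_eq (l : List Char) :
    splitWord l = (l.takeWhile isLowerAscii, l.dropWhile isLowerAscii) := by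
  induction l with
  | nil => rfl
  | cons c cs ih =>
    by_cases h : isLowerAscii c = true <;> simp [splitWord, h, ih]

-- Splitting a prefix "t ++ sep" at the lowercase/non-lowercase boundary: for a type word t
-- made of lowercase letters and a separator starting with a non-lowercase char,
-- "t ++ sep is a prefix of l" ⟺ "the leading lowercase run of l is exactly t, and sep
-- is a prefix of what follows".
lemma prefix_split (t : List Char) (s₀ : Char) (s' l : List Char)
    (ht : ∀ c ∈ t, isLowerAscii c = true) (hs : isLowerAscii s₀ = false) :
    (t ++ s₀ :: s') <+: l ↔
      l.takeWhile isLowerAscii = t ∧ (s₀ :: s') <+: l.dropWhile isLowerAscii := by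
  have htake_t : t.takeWhile isLowerAscii = t := List.takeWhile_eq_self_iff.mpr ht
  have hdrop_t : t.dropWhile isLowerAscii = [] := List.dropWhile_eq_nil_iff.mpr ht
  constructor
  · rintro ⟨r, rfl⟩
    have e : (t ++ s₀ :: s') ++ r = t ++ (s₀ :: (s' ++ r)) := by simp
    rw [e]
    refine ⟨?_, ?_⟩
    · rw [List.takeWhile_append, htake_t]
      simp [hs]
    · rw [List.dropWhile_append, hdrop_t]
      simp only [List.isEmpty_nil, if_true, List.dropWhile_cons, hs, Bool.false_eq_true,
        if_false]
      exact ⟨r, by simp⟩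
  · rintro ⟨hw, r, hr⟩
    refine ⟨r, ?_⟩
    conv_rhs => rw [← List.takeWhile_append_dropWhile (p := isLowerAscii) (l := l)]
    rw [hw, ← hr]
    simp

lemma types_lower : ∀ t ∈ commitTypes, ∀ c ∈ t, isLowerAscii c = true := by
  simp [commitTypes, isLowerAscii]

-- the word-membership tests agree: the set of type words contains the word as a String
-- iff commitTypes contains it as a char list
lemma mem_words (w : List Char) :
    PySem.Set.contains commitTypeWords (String.ofList w) = commitTypes.contains w := by
  rw [Bool.eq_iff_iff]
  simp [PySem.Set.contains, commitTypeWords, commitTypes, ← String.toList_inj]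

lemma colon_prefix (rest : List Char) : ([':'] <+: rest) ↔ rest.take 1 = [':'] := by
  cases rest <;> simp [List.cons_prefix_cons, eq_comm]

-- the separator check agrees with the three startswith tests on the rest of the message
lemma sepOk_eq (r : List Char) :
    sepOk r = (PySem.Chars.startswith r [':'] || PySem.Chars.startswith r ['!', ':']
      || PySem.Chars.startswith r ['(']) := by
  rw [Bool.eq_iff_iff]
  cases r with
  | nil => simp [sepOk, PySem.Chars.startswith_iff]
  | cons c rest =>
    simp only [sepOk, PySem.Chars.startswith_iff, List.cons_prefix_cons, colon_prefix,
      List.take_succ_cons, List.take_zero, List.nil_prefix, and_true, Bool.or_eq_true,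
      beq_iff_eq, List.cons.injEq]
    constructor
    · rintro ((h | h) | ⟨h1, h2⟩)
      · exact Or.inl (Or.inl h.symm)
      · exact Or.inr h.symm
      · exact Or.inl (Or.inr ⟨h1.symm, h2⟩)
    · rintro ((h | ⟨h1, h2⟩) | h)
      · exact Or.inl (Or.inl h.symm)
      · exact Or.inr ⟨h1.symm, h2⟩
      · exact Or.inl (Or.inr h.symm)

-- the two top-level conditions agree
lemma cond_eq (l : List Char) :
    commitTypes.any (fun t =>
      PySem.Chars.startswith l (t ++ [':'])
      || PySem.Chars.startswith l (t ++ ['!', ':'])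
      || PySem.Chars.startswith l (t ++ ['('])) =
    (PySem.Set.contains commitTypeWords (String.ofList (l.takeWhile isLowerAscii))
      && sepOk (l.dropWhile isLowerAscii)) := by
  rw [mem_words, sepOk_eq, Bool.eq_iff_iff]
  simp only [List.any_eq_true, Bool.or_eq_true, Bool.and_eq_true,
    PySem.Chars.startswith_iff, List.contains_iff_mem]
  constructor
  · rintro ⟨t, htmem, (h | h) | h⟩
    · obtain ⟨hw, hp⟩ := (prefix_split t ':' [] l (types_lower t htmem) (by decide)).mp h
      exact ⟨hw ▸ htmem, Or.inl (Or.inl hp)⟩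
    · obtain ⟨hw, hp⟩ := (prefix_split t '!' [':'] l (types_lower t htmem) (by decide)).mp h
      exact ⟨hw ▸ htmem, Or.inl (Or.inr hp)⟩
    · obtain ⟨hw, hp⟩ := (prefix_split t '(' [] l (types_lower t htmem) (by decide)).mp h
      exact ⟨hw ▸ htmem, Or.inr hp⟩
  · rintro ⟨hmem, (h | h) | h⟩ <;>
      refine ⟨l.takeWhile isLowerAscii, hmem, ?_⟩
    · exact Or.inl (Or.inl ((prefix_split _ ':' [] l (types_lower _ hmem) (by decide)).mpr ⟨rfl, h⟩))
    · exact Or.inl (Or.inr ((prefix_split _ '!' [':'] l (types_lower _ hmem) (by decide)).mpr ⟨rfl, h⟩))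
    · exact Or.inr ((prefix_split _ '(' [] l (types_lower _ hmem) (by decide)).mpr ⟨rfl, h⟩)

-- the two "fix: " constructions build the same string
lemma fix_append (s : String) : String.ofList ("fix: ".toList ++ s.toList) = "fix: " ++ s := by
  rw [← String.toList_inj]; simp

-- ===== VERDICT (by name: the statement is the Claim_ definition above) =====
theorem format_conventional_commit_spec : Claim_equal_format_conventional_commit := by
  intro description _
  unfold Spec_format_conventional_commit format_conventional_commit format_conventional_commit_alt
  rw [splitWord_eq, cond_eq, fix_append]
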